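-- pv_equiv track=rewrite | github.com/leticiazorzirama/python-lab-from-scratch | Annoying-elephants_Song-generator.py | elephants
-- ===== SOURCE A (Python) =====
-- def annoy(n):
--     # Base case: if n is less than 1, return an empty string
--     if n < 1:
--         return ""
--
--     # Recursive case: repeat "annoy " n times
--     return "annoy " + annoy(n - 1)
--
-- def elephants(n):
--     # Base case: if n is less than 1, return an empty string
--     if n < 1:
--         return ""
--
--     # First line when n == 1
--     if n == 1:
--         return "One elephant annoys a lot of people.\n"
--
--     # Build the two parts for n > 1
--     part1 = f"{n - 1} elephants annoy a lot of people.\n"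
--     part2 = f"{n} elephants {annoy(n)}much more.\n"
--
--     # When n == 2, skip part1 to match the expected format
--     if n == 2:
--         return elephants(n - 1) + part2
--
--     # Recursive call assembling the full song
--     return elephants(n - 1) + part1 + part2
-- ===== SOURCE B (Python) =====
-- def elephants(n):
--     if n < 1:
--         return ""
--     lines = ["One elephant annoys a lot of people.\n"]
--     k = 2
--     while k <= n:
--         if k >= 3:
--             lines.append(f"{k - 1} elephants annoy a lot of people.\n")
--         lines.append(f"{k} elephants " + "annoy " * k + "much more.\n")
--         k += 1
--     return "".join(lines)
-- ===== Notes on version B (the rewrite author's own statement) =====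
-- stated objective: faster
-- what changed: Replaced the two recursive functions (annoy + elephants, each re-concatenating the whole accumulated string) with a single iterative loop that collects the lines in a list ('annoy ' * k for the refrain) and joins them once.
import Mathlib
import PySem

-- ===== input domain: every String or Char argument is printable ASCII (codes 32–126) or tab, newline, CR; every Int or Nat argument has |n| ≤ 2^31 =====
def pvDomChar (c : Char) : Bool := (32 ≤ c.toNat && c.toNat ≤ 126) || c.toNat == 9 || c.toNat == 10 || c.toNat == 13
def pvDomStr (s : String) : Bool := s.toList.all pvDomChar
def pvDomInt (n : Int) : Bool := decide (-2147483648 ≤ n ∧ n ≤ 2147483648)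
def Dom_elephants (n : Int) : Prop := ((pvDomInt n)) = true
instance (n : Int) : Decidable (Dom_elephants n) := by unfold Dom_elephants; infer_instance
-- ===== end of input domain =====

-- B replaces the two recursive string-concatenating functions with one iterative
-- loop that collects the lines in a list and joins them once (faster: no repeated
-- re-copying of the accumulated string).

-- ===== PORT A =====
def annoy (n : Int) : String :=
  if n < 1 then "" else "annoy " ++ annoy (n - 1)
termination_by n.toNat
decreasing_by omega

def elephants (n : Int) : String :=
  if n < 1 then ""
  else if n = 1 then "One elephant annoys a lot of people.\n"
  else
    let part1 := PySem.Int.toStr (n - 1) ++ " elephants annoy a lot of people.\n"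
    let part2 := PySem.Int.toStr n ++ " elephants " ++ annoy n ++ "much more.\n"
    if n = 2 then elephants (n - 1) ++ part2
    else elephants (n - 1) ++ part1 ++ part2
termination_by n.toNat
decreasing_by all_goals omega

-- ===== PORT B =====
-- f"{k - 1} elephants annoy a lot of people.\n"
def elephantsLine1 (k : Int) : String :=
  PySem.Int.toStr (k - 1) ++ " elephants annoy a lot of people.\n"

-- f"{k} elephants " + "annoy " * k + "much more.\n"  ("annoy " * k via pyRepeat, exact for str*int)
def elephantsLine2 (k : Int) : String :=
  PySem.Int.toStr k ++ " elephants " ++ String.ofList (PySem.List.pyRepeat "annoy ".toList k) ++ "much more.\n"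

-- the 'while k <= n' loop of Source B, appending to the lines accumulator
def elephantsLoop (n k : Int) (lines : List String) : List String :=
  if k ≤ n then
    elephantsLoop n (k + 1)
      (lines ++ (if 3 ≤ k then [elephantsLine1 k] else []) ++ [elephantsLine2 k])
  else lines
termination_by (n + 1 - k).toNat
decreasing_by omega

def elephants_alt (n : Int) : String :=
  if n < 1 then ""
  else PySem.Str.join "" (elephantsLoop n 2 ["One elephant annoys a lot of people.\n"])

-- ===== PRECONDITION & SPEC =====
-- Pre_ excludes large n, where A's n-deep recursion overflows CPython's default
-- recursion limit and raises RecursionError (B's single loop still returns there).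
def Pre_elephants (n : Int) : Prop := n < 997
instance (n : Int) : Decidable (Pre_elephants n) := by unfold Pre_elephants; infer_instance
def pvWitness_elephants : Int := (5)

def Spec_elephants (n : Int) (out : String) : Prop := out = elephants_alt n
instance (n : Int) (out : String) : Decidable (Spec_elephants n out) := by unfold Spec_elephants; infer_instance

-- ===== CLAIM (what is proved, stated in full; the proofs are below) =====
def Claim_equal_elephants : Prop := ∀ (n : Int), Dom_elephants n → Pre_elephants n → Spec_elephants n (elephants n)

-- ===== LEMMAS AND PROOFS =====

-- "".join concatenates
theorem charsJoin_empty (l : List (List Char)) : PySem.Chars.join [] l = l.flatten := by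
  induction l with
  | nil => simp [PySem.Chars.join_nil]
  | cons p rest ih =>
    cases rest with
    | nil => simp [PySem.Chars.join_singleton]
    | cons q r =>
      rw [PySem.Chars.join_cons_cons]
      simp only [List.flatten_cons] at ih ⊢
      rw [ih]
      simp

theorem strJoin_empty (l : List String) :
    PySem.Str.join "" l = String.ofList ((l.map String.toList).flatten) := by
  unfold PySem.Str.join
  rw [show ("" : String).toList = [] from rfl, charsJoin_empty]

theorem strJoin_empty_append (l₁ l₂ : List String) :
    PySem.Str.join "" (l₁ ++ l₂) = PySem.Str.join "" l₁ ++ PySem.Str.join "" l₂ := by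
  simp [strJoin_empty, String.ofList_append]

theorem strJoin_empty_singleton (s : String) : PySem.Str.join "" [s] = s := by
  simp [strJoin_empty]

-- annoy n = "annoy " * n
theorem annoy_eq (n : Int) :
    annoy n = String.ofList (PySem.List.pyRepeat "annoy ".toList n) := by
  induction hm : n.toNat generalizing n with
  | zero =>
    rw [annoy]
    have hlt : n < 1 := by omega
    simp [hlt, PySem.List.pyRepeat, hm]
  | succ m ih =>
    rw [annoy]
    have hlt : ¬ n < 1 := by omega
    have h1 : (n - 1).toNat = m := by omega
    rw [if_neg hlt, ih (n - 1) h1]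
    have hrep : PySem.List.pyRepeat "annoy ".toList n
        = "annoy ".toList ++ PySem.List.pyRepeat "annoy ".toList (n - 1) := by
      simp [PySem.List.pyRepeat, hm, h1, List.replicate_succ]
    rw [hrep, String.ofList_append]
    congr 1

-- the loop's accumulator comes out in front
theorem loop_stop (n k : Int) (ls : List String) (h : ¬ k ≤ n) :
    elephantsLoop n k ls = ls := by
  rw [elephantsLoop]; simp [h]

theorem loop_acc (m : Nat) (n k : Int) (ls : List String) (hm : (n + 1 - k).toNat = m) :
    elephantsLoop n k ls = ls ++ elephantsLoop n k [] := by
  induction m generalizing k ls with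
  | zero =>
    have h : ¬ k ≤ n := by omega
    rw [loop_stop n k ls h, loop_stop n k [] h]
    simp
  | succ m ih =>
    by_cases h : k ≤ n
    · conv_lhs => rw [elephantsLoop]
      conv_rhs => rw [elephantsLoop]
      rw [if_pos h, if_pos h]
      have hm' : (n + 1 - (k + 1)).toNat = m := by omega
      rw [ih (k + 1) ((ls ++ (if 3 ≤ k then [elephantsLine1 k] else [])) ++ [elephantsLine2 k]) hm',
          ih (k + 1) ((([] : List String) ++ (if 3 ≤ k then [elephantsLine1 k] else [])) ++ [elephantsLine2 k]) hm']
      simp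
    · rw [loop_stop n k ls h, loop_stop n k [] h]
      simp

-- one step of Source B's loop body, as a list of lines
def elephantsStep (k : Int) : List String :=
  (if 3 ≤ k then [elephantsLine1 k] else []) ++ [elephantsLine2 k]

-- peel the LAST iteration off the loop
theorem loop_peel (m : Nat) (n k : Int) (hk : k ≤ n) (hm : (n - k).toNat = m) :
    elephantsLoop n k [] = elephantsLoop (n - 1) k [] ++ elephantsStep n := by
  induction m generalizing k with
  | zero =>
    have hkn : k = n := by omega
    subst hkn
    conv_lhs => rw [elephantsLoop]
    rw [if_pos hk]
    rw [loop_stop k (k + 1) _ (by omega), loop_stop (k - 1) k [] (by omega)]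
    simp [elephantsStep]
  | succ m ih =>
    have hk' : k + 1 ≤ n := by omega
    conv_lhs => rw [elephantsLoop]
    conv_rhs => rw [elephantsLoop]
    rw [if_pos hk, if_pos (show k ≤ n - 1 by omega)]
    rw [loop_acc ((n + 1 - (k + 1)).toNat) n (k + 1) _ rfl]
    rw [loop_acc ((n - 1 + 1 - (k + 1)).toNat) (n - 1) (k + 1) _ rfl]
    rw [ih (k + 1) hk' (by omega)]
    simp

-- main induction: A = B for n ≥ 1
theorem elephants_eq_alt (m : Nat) (n : Int) (hn : 1 ≤ n) (hm : n.toNat = m) :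
    elephants n = elephants_alt n := by
  induction m generalizing n with
  | zero => omega
  | succ m ih =>
    rw [elephants, elephants_alt]
    have h0 : ¬ n < 1 := by omega
    rw [if_neg h0, if_neg h0]
    by_cases h1 : n = 1
    · subst h1
      rw [if_pos rfl]
      rw [show elephantsLoop 1 2 ["One elephant annoys a lot of people.\n"]
            = ["One elephant annoys a lot of people.\n"] by
        rw [elephantsLoop]; simp]
      rw [strJoin_empty_singleton]
    · rw [if_neg h1]
      have hn2 : 2 ≤ n := by omega
      rw [loop_acc ((n + 1 - 2).toNat) n 2 _ rfl,
          loop_peel ((n - 2).toNat) n 2 hn2 rfl]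
      have halt : elephants_alt (n - 1)
          = PySem.Str.join "" (elephantsLoop (n - 1) 2 ["One elephant annoys a lot of people.\n"]) := by
        rw [elephants_alt, if_neg (show ¬ n - 1 < 1 by omega)]
      have hA : elephants (n - 1) = elephants_alt (n - 1) :=
        ih (n - 1) (by omega) (by omega)
      rw [loop_acc ((n - 1 + 1 - 2).toNat) (n - 1) 2 _ rfl] at halt
      by_cases h2 : n = 2
      · subst h2
        rw [if_pos rfl]
        rw [show (List.cons "One elephant annoys a lot of people.\n" List.nil)
              ++ (elephantsLoop (2 - 1) 2 [] ++ elephantsStep 2)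
            = (["One elephant annoys a lot of people.\n"] ++ elephantsLoop (2 - 1) 2 [])
              ++ elephantsStep 2 by simp]
        rw [strJoin_empty_append, ← halt, ← hA]
        rw [show elephantsStep 2 = [elephantsLine2 2] by rw [elephantsStep]; norm_num]
        rw [strJoin_empty_singleton, elephantsLine2, annoy_eq]
      · rw [if_neg h2]
        have hn3 : 3 ≤ n := by omega
        rw [show (List.cons "One elephant annoys a lot of people.\n" List.nil)
              ++ (elephantsLoop (n - 1) 2 [] ++ elephantsStep n)
            = (["One elephant annoys a lot of people.\n"] ++ elephantsLoop (n - 1) 2 [])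
              ++ elephantsStep n by simp]
        rw [strJoin_empty_append, ← halt, ← hA]
        rw [show elephantsStep n = [elephantsLine1 n] ++ [elephantsLine2 n] by
          rw [elephantsStep, if_pos hn3]]
        rw [strJoin_empty_append, strJoin_empty_singleton, strJoin_empty_singleton]
        rw [elephantsLine1, elephantsLine2, annoy_eq]
        simp [String.append_assoc]

-- ===== VERDICT (by name: the statement is the Claim_ definition above) =====
theorem elephants_spec : Claim_equal_elephants := by
  intro n _ _
  unfold Spec_elephants
  by_cases hn : n < 1
  · rw [elephants, elephants_alt, if_pos hn, if_pos hn]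
  · exact elephants_eq_alt n.toNat n (by omega) rfl
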